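-- pv_equiv track=rewrite | github.com/CarlFriedrichGauss1/Programming_II | Programms/2020_June_programm_1.py | functions
-- ===== SOURCE A (Python) =====
-- import math
--
-- def functions(list1):
--     summary = []
--     maximum = []
--     index_max = []
--     for i in list1:
--         max = -math.inf
--         sum = 0
--         ind_final = 0
--         ind_point = 0
--         for j in i:
--             sum += j
--             if j >= max:
--                 max = j
--                 ind_final =  ind_point
--             ind_point += 1
--         summary.append(sum)
--         maximum.append(max)
--         index_max.append(ind_final)
--
--     return summary , maximum, index_max
-- ===== SOURCE B (Python) =====
-- def functions(list1):
--     summary = [sum(sub) for sub in list1]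
--     maximum = [max(sub) for sub in list1]
--     index_max = [len(sub) - 1 - sub[::-1].index(m)
--                  for sub, m in zip(list1, maximum)]
--     return summary, maximum, index_max
-- ===== Notes on version B (the rewrite author's own statement) =====
-- stated objective: idiomatic
-- what changed: Replaces A's fused hand-rolled inner loop (running sum, running max with last-max index tracking) by three separate idiomatic passes: sum(), max(), and a reverse-slice index() to find the last maximum.
-- outside the precondition, e.g. on functions([[]]): A returns ([0], [-inf], [0]), B raises ValueError
import Mathlib
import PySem

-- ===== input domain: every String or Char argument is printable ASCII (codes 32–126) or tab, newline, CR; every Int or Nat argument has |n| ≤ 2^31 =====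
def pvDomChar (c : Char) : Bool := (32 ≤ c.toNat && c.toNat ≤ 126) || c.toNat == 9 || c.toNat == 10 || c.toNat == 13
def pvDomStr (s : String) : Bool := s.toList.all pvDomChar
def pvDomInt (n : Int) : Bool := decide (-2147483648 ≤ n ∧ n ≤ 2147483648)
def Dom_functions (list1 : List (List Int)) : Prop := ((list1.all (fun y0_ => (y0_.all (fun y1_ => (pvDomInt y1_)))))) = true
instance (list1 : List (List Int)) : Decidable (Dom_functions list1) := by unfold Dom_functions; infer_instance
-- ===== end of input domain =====

-- B computes the three result lists with separate idiomatic passes (sum, max, reverse-scan index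
-- of the last maximum) instead of A's single fused loop; same cost, plainer code.


-- ===== PORT A =====
-- 'max = -math.inf' is modelled as 'none' (j >= -inf is always true; some m afterwards).
def functionsGe (j : Int) (m : Option Int) : Bool :=
  match m with
  | none => true
  | some mv => decide (mv ≤ j)

-- the inner 'for j in i' loop; state = (max, sum, ind_final, ind_point)
def functionsInner : List Int → Option Int × Int × Int × Int → Option Int × Int × Int × Int
  | [], st => st
  | j :: rest, (m, s, indf, indp) =>
      let s' := s + j
      let (m', indf') := if functionsGe j m then (some j, indp) else (m, indf)
      functionsInner rest (m', s', indf', indp + 1)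

-- the outer 'for i in list1' loop, appending to the three result lists
-- ('m.getD 0' stands for the '-inf' appended on an empty sublist; such inputs are outside Pre_)
def functionsOuter : List (List Int) → List Int × List Int × List Int → List Int × List Int × List Int
  | [], acc => acc
  | i :: rest, (su, ma, im) =>
      let (m, s, indf, _) := functionsInner i (none, 0, 0, 0)
      functionsOuter rest (su ++ [s], ma ++ [m.getD 0], im ++ [indf])

def functions (list1 : List (List Int)) : List Int × List Int × List Int :=
  functionsOuter list1 ([], [], [])

-- ===== PORT B =====
def functions_alt (list1 : List (List Int)) : List Int × List Int × List Int :=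
  let summary := list1.map (fun sub => sub.sum)
  let maximum := list1.map (fun sub => (PySem.List.max? sub (fun x => x)).getD 0)
  let index_max := (list1.zip maximum).map
      (fun p => ((p.1.length : Int) - 1 - ((PySem.List.index? p.1.reverse p.2).getD 0 : Int)))
  (summary, maximum, index_max)

-- ===== PRECONDITION & SPEC =====
-- Pre_ excludes inputs with an empty sublist: there A appends -math.inf, a float outside the
-- declared int list type (and B's max() raises ValueError).
def Pre_functions (list1 : List (List Int)) : Prop := ∀ sub ∈ list1, sub ≠ []
instance (list1 : List (List Int)) : Decidable (Pre_functions list1) := by unfold Pre_functions; infer_instance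

def pvWitness_functions : List (List Int) := [[1, 2, 2], [-3], [5, 0, 5]]

def Spec_functions (list1 : List (List Int)) (out : List Int × List Int × List Int) : Prop := out = functions_alt list1
instance (list1 : List (List Int)) (out : List Int × List Int × List Int) : Decidable (Spec_functions list1 out) := by unfold Spec_functions; infer_instance

-- ===== CLAIM (what is proved, stated in full; the proofs are below) =====
def Claim_equal_functions : Prop := ∀ (list1 : List (List Int)), Dom_functions list1 → Pre_functions list1 → Spec_functions list1 (functions list1)

-- ===== LEMMAS AND PROOFS =====

-- B's per-sublist values
def pvBmax (sub : List Int) : Int := (PySem.List.max? sub (fun x => x)).getD 0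
def pvBidx (sub : List Int) : Int :=
  (sub.length : Int) - 1 - ((PySem.List.index? sub.reverse (pvBmax sub)).getD 0 : Int)

theorem functionsInner_append (xs ys : List Int) (st : Option Int × Int × Int × Int) :
    functionsInner (xs ++ ys) st = functionsInner ys (functionsInner xs st) := by
  induction xs generalizing st with
  | nil => rfl
  | cons x t ih =>
      obtain ⟨m, s, indf, indp⟩ := st
      simp [functionsInner, ih]

theorem pvBmax_cons (h : Int) (t : List Int) :
    pvBmax (h :: t) = t.foldl max h := by
  simp [pvBmax, PySem.List.max?_id_cons]

theorem pvBmax_snoc (t : List Int) (x : Int) (hne : t ≠ []) :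
    pvBmax (t ++ [x]) = max (pvBmax t) x := by
  obtain ⟨a, tt, rfl⟩ := List.exists_cons_of_ne_nil hne
  simp [pvBmax_cons, List.foldl_append]

theorem pvBmax_mem (sub : List Int) (hne : sub ≠ []) : pvBmax sub ∈ sub := by
  cases sub with
  | nil => exact absurd rfl hne
  | cons h t =>
    have hmax : PySem.List.max? (h :: t) (fun x => x) = some (t.foldl max h) :=
      PySem.List.max?_id_cons h t
    have hm := PySem.List.max?_mem hmax
    simpa [pvBmax_cons] using hm

-- characterisation of A's inner loop on a nonempty sublist
theorem functionsInner_char (sub : List Int) (hne : sub ≠ []) :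
    functionsInner sub (none, 0, 0, 0)
      = (some (pvBmax sub), sub.sum, pvBidx sub, (sub.length : Int)) := by
  induction sub using List.reverseRecOn with
  | nil => exact absurd rfl hne
  | append_singleton t x ih =>
      by_cases htne : t = []
      · subst htne
        simp only [List.nil_append, functionsInner, functionsGe, pvBmax, pvBidx,
          PySem.List.max?_id_cons, List.foldl_nil, Option.getD_some, List.reverse_singleton]
        rw [PySem.List.index?_cons_self]
        simp
      · rw [functionsInner_append, ih htne]
        have hmem : pvBmax t ∈ t := pvBmax_mem t htne
        have hmaxsnoc : pvBmax (t ++ [x]) = max (pvBmax t) x := pvBmax_snoc t x htne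
        by_cases hge : pvBmax t ≤ x
        · -- new maximum, found at the last position
          have hmx : pvBmax (t ++ [x]) = x := by rw [hmaxsnoc]; omega
          have hidx : pvBidx (t ++ [x]) = (t.length : Int) := by
            simp only [pvBidx, hmx, List.reverse_append, List.reverse_singleton,
              List.singleton_append]
            rw [PySem.List.index?_cons_self]
            simp
          simp only [functionsInner, functionsGe, hge, decide_true, if_true]
          simp [hmx, hidx]
        · -- old maximum stays; x ≠ max, so the reverse scan skips x
          have hmx : pvBmax (t ++ [x]) = pvBmax t := by rw [hmaxsnoc]; omega
          have hxne : x ≠ pvBmax t := by omega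
          obtain ⟨r, hr⟩ : ∃ r, PySem.List.index? t.reverse (pvBmax t) = some r := by
            have hmr : pvBmax t ∈ t.reverse := by simpa using hmem
            have := (PySem.List.index?_isSome_iff (xs := t.reverse) (v := pvBmax t)).2 hmr
            exact Option.isSome_iff_exists.mp this
          have hidx : pvBidx (t ++ [x]) = pvBidx t := by
            simp only [pvBidx, hmx, List.reverse_append, List.reverse_singleton,
              List.singleton_append]
            rw [PySem.List.index?_cons_of_ne _ hxne, hr]
            simp only [Option.map_some, Option.getD_some, List.length_append,
              List.length_singleton]
            push_cast
            ring
          simp only [functionsInner, functionsGe, hge, decide_false]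
          simp [hmx, hidx]

-- the outer loop appends B's per-sublist values
theorem functionsOuter_char (l : List (List Int)) (hpre : ∀ sub ∈ l, sub ≠ [])
    (su ma im : List Int) :
    functionsOuter l (su, ma, im)
      = (su ++ l.map (fun sub => sub.sum),
         ma ++ l.map pvBmax,
         im ++ l.map pvBidx) := by
  induction l generalizing su ma im with
  | nil => simp [functionsOuter]
  | cons i rest ih =>
      have hne : i ≠ [] := hpre i (by simp)
      have hrest : ∀ sub ∈ rest, sub ≠ [] := fun s hs => hpre s (by simp [hs])
      simp only [functionsOuter, functionsInner_char i hne]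
      rw [ih hrest]
      simp

theorem zip_map_self {α β γ : Type} (l : List α) (f : α → β) (g : α × β → γ) :
    (l.zip (l.map f)).map g = l.map (fun a => g (a, f a)) := by
  induction l with
  | nil => rfl
  | cons a t ih => simp [ih]

-- ===== VERDICT (by name: the statement is the Claim_ definition above) =====
theorem functions_spec : Claim_equal_functions := by
  intro list1 _ hpre
  unfold Spec_functions functions functions_alt
  rw [functionsOuter_char list1 hpre]
  simp [zip_map_self, pvBmax, pvBidx]
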